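-- pv_equiv track=rewrite | github.com/happycat33/cmput-455-assignment3 | assignment3/pattern.py | pat3_expand
-- ===== SOURCE A (Python) =====
-- from functools import reduce
-- from typing import List, Set
--
-- Pattern = List[str]
--
-- def pat3_expand(pat: Pattern) -> Pattern:
--     """ All possible neighborhood configurations matching a given pattern;
--         used just for a combinatoric explosion when loading them in an
--         in-memory set. """
--
--     def pat_rot90(p: Pattern) -> Pattern:
--         return [
--             p[2][0] + p[1][0] + p[0][0],
--             p[2][1] + p[1][1] + p[0][1],
--             p[2][2] + p[1][2] + p[0][2],
--         ]
--
--     def pat_vertflip(p: Pattern) -> Pattern: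
--         return [p[2], p[1], p[0]]
--
--     def pat_horizflip(p: Pattern) -> Pattern:
--         return [l[::-1] for l in p]
--
--     def pat_swapcolors(p: Pattern) -> Pattern:
--         return [
--             l.replace("X", "Z")
--             .replace("x", "z")
--             .replace("O", "X")
--             .replace("o", "x")
--             .replace("Z", "O")
--             .replace("z", "o")
--             for l in p
--         ]
--
--     def pat_wildexp(p: str, c: str, to: List[str]) -> Pattern:
--         i = p.find(c)
--         if i == -1:
--             return [p]
--         return reduce(
--             lambda a, b: a + b, [pat_wildexp(p[:i] + t + p[i + 1 :], c, to) for t in to]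
--         )
--
--     def pat_wildcards(pat: str) -> Pattern:
--         return [
--             p3
--             for p in pat_wildexp(pat, "?", list(".XO "))
--             for p2 in pat_wildexp(p, "x", list(".O "))
--             for p3 in pat_wildexp(p2, "o", list(".X "))
--         ]
--
--     return [
--         p
--         for p1 in [pat, pat_rot90(pat)]
--         for p2 in [p1, pat_vertflip(p1)]
--         for p3 in [p2, pat_horizflip(p2)]
--         for p4 in [p3, pat_swapcolors(p3)]
--         for p in pat_wildcards("".join(p4))
--     ]
-- ===== SOURCE B (Python) =====
-- from typing import List
--
-- Pattern = List[str]
--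
-- # net per-char effect of the original replace chain (which also sends any
-- # pre-existing Z/z through its sentinel to O/o)
-- _SWAP = str.maketrans("XxOoZz", "OoXxOo")
--
-- def pat3_expand(pat: Pattern) -> Pattern:
--     """ All possible neighborhood configurations matching a given pattern. """
--
--     def pat_rot90(p: Pattern) -> Pattern:
--         return [
--             p[2][0] + p[1][0] + p[0][0],
--             p[2][1] + p[1][1] + p[0][1],
--             p[2][2] + p[1][2] + p[0][2],
--         ]
--
--     def pat_vertflip(p: Pattern) -> Pattern:
--         return [p[2], p[1], p[0]]
--
--     def pat_horizflip(p: Pattern) -> Pattern: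
--         return [l[::-1] for l in p]
--
--     def pat_swapcolors(p: Pattern) -> Pattern:
--         return [l.translate(_SWAP) for l in p]
--
--     def expand1(s: str, c: str, to: str) -> List[str]:
--         # all indices of the wildcard, then every replacement tuple in
--         # product order (leftmost position varies slowest)
--         idxs = [i for i, ch in enumerate(s) if ch == c]
--         combos = [[]]
--         for _ in idxs:
--             combos = [cb + [r] for cb in combos for r in to]
--         out = []
--         for cb in combos:
--             chars = list(s)
--             for i, r in zip(idxs, cb):
--                 chars[i] = r
--             out.append("".join(chars))
--         return out
--
--     def expand3(s: str) -> List[str]: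
--         return [
--             p3
--             for p in expand1(s, "?", ".XO ")
--             for p2 in expand1(p, "x", ".O ")
--             for p3 in expand1(p2, "o", ".X ")
--         ]
--
--     pats = [pat, pat_rot90(pat)]
--     for f in (pat_vertflip, pat_horizflip, pat_swapcolors):
--         pats = [q for p in pats for q in (p, f(p))]
--     return [s for p in pats for s in expand3("".join(p))]
-- ===== Notes on version B (the rewrite author's own statement) =====
-- stated objective: alternative
-- what changed: The recursive find-first-wildcard-and-substitute expander (pat_wildexp with reduce) is replaced by an iterative product enumeration: collect all wildcard indices once, build every replacement tuple in product order by one fold, and fill the positions of each tuple into the string; the six-step sentinel replace chain becomes one translate table and the 16 symmetry variants are produced by fold-doubling instead of the nested comprehension.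
import Mathlib
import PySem

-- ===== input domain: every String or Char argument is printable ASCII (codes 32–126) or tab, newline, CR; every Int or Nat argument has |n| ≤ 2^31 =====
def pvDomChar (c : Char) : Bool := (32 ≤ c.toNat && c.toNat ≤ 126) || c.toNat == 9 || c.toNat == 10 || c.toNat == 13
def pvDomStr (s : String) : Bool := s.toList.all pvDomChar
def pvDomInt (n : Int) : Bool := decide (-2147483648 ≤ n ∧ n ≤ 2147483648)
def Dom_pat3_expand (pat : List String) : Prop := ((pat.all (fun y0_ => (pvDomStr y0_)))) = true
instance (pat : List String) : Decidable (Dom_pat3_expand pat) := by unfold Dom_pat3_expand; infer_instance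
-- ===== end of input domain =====

-- B replaces the recursive find-first-and-substitute wildcard expander by an iterative
-- index-list/product-tuple enumeration (and the sentinel replace chain by one char table);
-- same return value, no speed claim.

-- ===== PORT A =====
-- works over List Char / List (List Char); Strings are converted once at entry and back at exit

-- p[i] for a row list / s[j] for a char; in-range under Pre_, default only where Python raises
def pvRowA (p : List (List Char)) (i : Nat) : List Char := p.getD i []
def pvChA (l : List Char) (j : Nat) : Char := l.getD j ' '

def rot90A (p : List (List Char)) : List (List Char) :=
  [ [pvChA (pvRowA p 2) 0, pvChA (pvRowA p 1) 0, pvChA (pvRowA p 0) 0],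
    [pvChA (pvRowA p 2) 1, pvChA (pvRowA p 1) 1, pvChA (pvRowA p 0) 1],
    [pvChA (pvRowA p 2) 2, pvChA (pvRowA p 1) 2, pvChA (pvRowA p 0) 2] ]

def vertflipA (p : List (List Char)) : List (List Char) := [pvRowA p 2, pvRowA p 1, pvRowA p 0]

def horizflipA (p : List (List Char)) : List (List Char) := p.map List.reverse  -- l[::-1]

-- str.replace(a, b) for 1-char a,b
def pvReplC (a b ch : Char) : Char := if ch = a then b else ch
def pvReplace (a b : Char) (l : List Char) : List Char := l.map (pvReplC a b)

def swapA (p : List (List Char)) : List (List Char) :=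
  p.map (fun l =>
    pvReplace 'z' 'o' (pvReplace 'Z' 'O' (pvReplace 'o' 'x'
      (pvReplace 'O' 'X' (pvReplace 'x' 'z' (pvReplace 'X' 'Z' l))))))

-- port of str.find returning none for -1
def findA (c : Char) : List Char → Option Nat
  | [] => none
  | ch :: rest => if ch = c then some 0 else (findA c rest).map (· + 1)

theorem findA_spec {c : Char} : ∀ {p : List Char} {i : Nat}, findA c p = some i →
    p.take i ++ c :: p.drop (i + 1) = p ∧ c ∉ p.take i := by
  intro p
  induction p with
  | nil => intro i h; simp [findA] at h
  | cons ch rest ih =>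
      intro i h
      by_cases hc : ch = c
      · simp [findA, hc] at h
        subst hc; subst h; simp
      · simp [findA, hc] at h
        obtain ⟨j, hj, rfl⟩ := h
        obtain ⟨h1, h2⟩ := ih hj
        constructor
        · show ch :: (rest.take j ++ c :: rest.drop (j + 1)) = ch :: rest
          rw [h1]
        · simp only [List.take_succ_cons, List.mem_cons, not_or]
          exact ⟨fun hx => hc hx.symm, h2⟩

theorem findA_count_lt {c t : Char} {p : List Char} {i : Nat}
    (h : findA c p = some i) (ht : t ≠ c) :
    (p.take i ++ t :: p.drop (i + 1)).count c < p.count c := by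
  obtain ⟨h1, h2⟩ := findA_spec h
  have hz : (p.take i).count c = 0 := List.count_eq_zero.mpr h2
  calc (p.take i ++ t :: p.drop (i + 1)).count c
      = (p.take i).count c + (t :: p.drop (i + 1)).count c := by simp [List.count_append]
    _ < (p.take i).count c + (c :: p.drop (i + 1)).count c := by
        simp [ht, hz]
    _ = (p.take i ++ c :: p.drop (i + 1)).count c := by simp [List.count_append]
    _ = p.count c := by rw [h1]

-- pat_wildexp; hto : c ∉ ts only justifies termination (Python's recursion terminates for
-- the three literal calls below for the same reason); reduce(+, [..]) is the flatten
def wildexpA (c : Char) (ts : List Char) (hto : c ∉ ts) (p : List Char) : List (List Char) :=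
  match h : findA c p with
  | none => [p]
  | some i =>
      (ts.attach.map (fun t => wildexpA c ts hto (p.take i ++ t.1 :: p.drop (i + 1)))).flatten
termination_by p.count c
decreasing_by
  exact findA_count_lt h (fun he => hto (he ▸ t.2))

def wildcardsA (s : List Char) : List (List Char) :=
  (wildexpA '?' ['.', 'X', 'O', ' '] (by decide) s).flatMap (fun p =>
    (wildexpA 'x' ['.', 'O', ' '] (by decide) p).flatMap (fun p2 =>
      wildexpA 'o' ['.', 'X', ' '] (by decide) p2))

def pat3_expand (pat : List String) : List String :=
  let base := pat.map String.toList
  [base, rot90A base].flatMap (fun p1 =>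
    [p1, vertflipA p1].flatMap (fun p2 =>
      [p2, horizflipA p2].flatMap (fun p3 =>
        [p3, swapA p3].flatMap (fun p4 =>
          (wildcardsA p4.flatten).map String.ofList))))

-- ===== PORT B =====

def rot90B (p : List (List Char)) : List (List Char) :=
  [ [pvChA (pvRowA p 2) 0, pvChA (pvRowA p 1) 0, pvChA (pvRowA p 0) 0],
    [pvChA (pvRowA p 2) 1, pvChA (pvRowA p 1) 1, pvChA (pvRowA p 0) 1],
    [pvChA (pvRowA p 2) 2, pvChA (pvRowA p 1) 2, pvChA (pvRowA p 0) 2] ]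

def vertflipB (p : List (List Char)) : List (List Char) := [pvRowA p 2, pvRowA p 1, pvRowA p 0]

def horizflipB (p : List (List Char)) : List (List Char) := p.map List.reverse

-- the one-pass translate table (Source B's _SWAP)
def swapCB (ch : Char) : Char :=
  if ch = 'X' then 'O' else if ch = 'x' then 'o' else if ch = 'O' then 'X'
  else if ch = 'o' then 'x' else if ch = 'Z' then 'O' else if ch = 'z' then 'o' else ch

def swapB (p : List (List Char)) : List (List Char) := p.map (fun l => l.map swapCB)

-- [i for i, ch in enumerate(s) if ch == c]
def idxsB (c : Char) : List Char → Nat → List Nat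
  | [], _ => []
  | ch :: rest, n => if ch = c then n :: idxsB c rest (n + 1) else idxsB c rest (n + 1)

def expand1B (c : Char) (ts : List Char) (s : List Char) : List (List Char) :=
  let idxs := idxsB c s 0
  let combos := idxs.foldl
    (fun acc _ => acc.flatMap (fun cb => ts.map (fun r => cb ++ [r]))) [[]]
  combos.map (fun cb => ((idxs.zip cb).foldl (fun chars ir => chars.set ir.1 ir.2) s))

def expand3B (s : List Char) : List (List Char) :=
  (expand1B '?' ['.', 'X', 'O', ' '] s).flatMap (fun p =>
    (expand1B 'x' ['.', 'O', ' '] p).flatMap (fun p2 =>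
      expand1B 'o' ['.', 'X', ' '] p2))

def pat3_expand_alt (pat : List String) : List String :=
  let base := pat.map String.toList
  let pats := [vertflipB, horizflipB, swapB].foldl
    (fun acc f => acc.flatMap (fun p => [p, f p])) [base, rot90B base]
  pats.flatMap (fun q => (expand3B q.flatten).map String.ofList)

-- ===== PRECONDITION & SPEC =====
-- exactly where Python A returns: pat_rot90/pat_vertflip need three rows, the first three
-- of which rot90 indexes at columns 0..2
def Pre_pat3_expand (pat : List String) : Prop :=
  3 ≤ pat.length ∧ ∀ s ∈ pat.take 3, 3 ≤ s.toList.length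
instance (pat : List String) : Decidable (Pre_pat3_expand pat) := by
  unfold Pre_pat3_expand; infer_instance

def pvWitness_pat3_expand : List String := ["X.O", ".?.", "O.X"]

def Spec_pat3_expand (pat : List String) (out : List String) : Prop := out = pat3_expand_alt pat
instance (pat : List String) (out : List String) : Decidable (Spec_pat3_expand pat out) := by
  unfold Spec_pat3_expand; infer_instance

-- ===== CLAIM (what is proved, stated in full; the proofs are below) =====
def Claim_equal_pat3_expand : Prop :=
  ∀ (pat : List String), Dom_pat3_expand pat → Pre_pat3_expand pat →
    Spec_pat3_expand pat (pat3_expand pat)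

-- ===== LEMMAS AND PROOFS =====

-- hub: structural one-pass wildcard expansion; both expanders are proved equal to it
def wildS (c : Char) (ts : List Char) : List Char → List (List Char)
  | [] => [[]]
  | ch :: rest =>
      if ch = c then ts.flatMap (fun t => (wildS c ts rest).map (t :: ·))
      else (wildS c ts rest).map (ch :: ·)

theorem wildS_of_not_mem {c : Char} {ts : List Char} {u : List Char} (h : c ∉ u) :
    wildS c ts u = [u] := by
  induction u with
  | nil => rfl
  | cons ch rest ih =>
      have : ch ≠ c := by rintro rfl; exact h (by simp)
      simp [wildS, this, ih (fun hx => h (by simp [hx]))]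

theorem wildS_append {c : Char} {ts : List Char} {u : List Char} (v : List Char) (h : c ∉ u) :
    wildS c ts (u ++ v) = (wildS c ts v).map (u ++ ·) := by
  induction u with
  | nil => simp
  | cons ch rest ih =>
      have hch : ch ≠ c := by rintro rfl; exact h (by simp)
      simp only [List.cons_append, wildS, hch,
        ih (fun hx => h (by simp [hx])), List.map_map]
      rfl

theorem wildexpA_eq_wildS (c : Char) (ts : List Char) (hto : c ∉ ts) (p : List Char) :
    wildexpA c ts hto p = wildS c ts p := by
  induction p using wildexpA.induct c ts hto with
  | case1 p h => -- findA c p = none : c ∉ p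
      have hcp : c ∉ p := by
        intro hm
        induction p with
        | nil => simp at hm
        | cons ch rest ih =>
            by_cases hc : ch = c
            · simp [findA, hc] at h
            · simp [findA, hc] at h
              rcases List.mem_cons.mp hm with h1 | h1
              · exact hc h1.symm
              · cases hrest : findA c rest with
                | none => exact ih (by simp [hrest]) h1
                | some j => simp [hrest] at h
      rw [wildexpA, h, wildS_of_not_mem hcp]
  | case2 p i h ih =>
      obtain ⟨h1, h2⟩ := findA_spec h
      rw [wildexpA, h]
      simp only []
      rw [show (List.map (fun t => wildexpA c ts hto (p.take i ++ t.1 :: p.drop (i + 1))) ts.attach)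
            = List.map (fun t => wildexpA c ts hto (p.take i ++ t :: p.drop (i + 1)))
                (ts.attach.map Subtype.val) from by rw [List.map_map]; rfl,
          List.attach_map_subtype_val, ← List.flatMap_def]
      conv_rhs => rw [← h1, wildS_append _ h2]
      have hs : wildS c ts (c :: p.drop (i + 1))
          = ts.flatMap (fun t => (wildS c ts (p.drop (i + 1))).map (t :: ·)) := by
        simp [wildS]
      rw [hs, List.map_flatMap]
      refine List.flatMap_congr (fun t ht => ?_)
      have htc : t ≠ c := fun he => hto (he ▸ ht)
      have hnm : c ∉ p.take i ++ [t] := by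
        simp only [List.mem_append, List.mem_singleton, not_or]
        exact ⟨h2, fun he => htc he.symm⟩
      rw [ih ⟨t, ht⟩,
        show p.take i ++ t :: p.drop (i + 1) = (p.take i ++ [t]) ++ p.drop (i + 1) by simp,
        wildS_append _ hnm]
      simp [Function.comp_def]

-- ---- B side: product-and-fill equals wildS ----

-- tuples in itertools.product order: leftmost position varies slowest
def prodL (ts : List Char) : Nat → List (List Char)
  | 0 => [[]]
  | k + 1 => ts.flatMap (fun t => (prodL ts k).map (t :: ·))

theorem idxsB_shift (c : Char) : ∀ (s : List Char) (n : Nat),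
    idxsB c s (n + 1) = (idxsB c s n).map (· + 1) := by
  intro s
  induction s with
  | nil => intro n; rfl
  | cons ch rest ih =>
      intro n
      by_cases hc : ch = c <;> simp [idxsB, hc, ih]

theorem foldl_combos (ts : List Char) : ∀ (l : List Nat) (init : List (List Char)),
    l.foldl (fun acc _ => acc.flatMap (fun cb => ts.map (fun r => cb ++ [r]))) init
      = init.flatMap (fun cb => (prodL ts l.length).map (cb ++ ·)) := by
  intro l
  induction l with
  | nil => intro init; simp [prodL]
  | cons x l ih =>
      intro init
      rw [List.foldl_cons, ih, List.flatMap_assoc]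
      refine List.flatMap_congr (fun cb _ => ?_)
      rw [List.flatMap_def, List.map_map, ← List.flatMap_def]
      simp only [List.length_cons, prodL, List.map_flatMap]
      refine List.flatMap_congr (fun t _ => ?_)
      rw [List.map_map]
      refine List.map_congr_left (fun w _ => ?_)
      simp

theorem fill_shift (a : Char) : ∀ (js : List Nat) (cb : List Char) (s : List Char),
    ((js.map (· + 1)).zip cb).foldl (fun chars ir => chars.set ir.1 ir.2) (a :: s)
      = a :: (js.zip cb).foldl (fun chars ir => chars.set ir.1 ir.2) s := by
  intro js
  induction js with
  | nil => intro cb s; rfl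
  | cons j js ih =>
      intro cb s
      cases cb with
      | nil => rfl
      | cons r cb => simp [List.set, ih]

theorem prodfill_eq_wildS (c : Char) (ts : List Char) : ∀ (s : List Char),
    (prodL ts (idxsB c s 0).length).map
        (fun cb => ((idxsB c s 0).zip cb).foldl (fun chars ir => chars.set ir.1 ir.2) s)
      = wildS c ts s := by
  intro s
  induction s with
  | nil => simp [idxsB, prodL, wildS]
  | cons ch rest ih =>
      by_cases hc : ch = c
      · subst hc
        rw [show idxsB ch (ch :: rest) 0 = 0 :: (idxsB ch rest 0).map (· + 1) from by
              simp [idxsB, idxsB_shift]]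
        simp only [List.length_cons, List.length_map, prodL, List.map_flatMap, List.map_map]
        rw [show wildS ch ts (ch :: rest) = ts.flatMap (fun t => (wildS ch ts rest).map (t :: ·))
              from by simp [wildS]]
        refine List.flatMap_congr (fun t _ => ?_)
        rw [← ih, List.map_map]
        refine List.map_congr_left (fun cb _ => ?_)
        simp only [Function.comp_apply, List.zip_cons_cons, List.foldl_cons, List.set]
        rw [fill_shift]
      · rw [show idxsB c (ch :: rest) 0 = (idxsB c rest 0).map (· + 1) from by
              simp [idxsB, hc, idxsB_shift]]
        rw [show wildS c ts (ch :: rest) = (wildS c ts rest).map (ch :: ·) from by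
              simp [wildS, hc]]
        rw [← ih, List.length_map, List.map_map]
        refine List.map_congr_left (fun cb _ => ?_)
        simp only [Function.comp_apply]
        rw [fill_shift]

theorem expand1B_eq_wildS (c : Char) (ts : List Char) (s : List Char) :
    expand1B c ts s = wildS c ts s := by
  rw [expand1B]
  simp only [foldl_combos, List.flatMap_cons, List.flatMap_nil, List.append_nil,
    List.nil_append, List.map_id']
  exact prodfill_eq_wildS c ts s

-- ---- the three stages agree ----
theorem wildcards_eq (s : List Char) : wildcardsA s = expand3B s := by
  simp only [wildcardsA, expand3B, wildexpA_eq_wildS, expand1B_eq_wildS]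

-- ---- color swap: the replace chain is the translate table ----
theorem swapc_eq (ch : Char) :
    pvReplC 'z' 'o' (pvReplC 'Z' 'O' (pvReplC 'o' 'x'
      (pvReplC 'O' 'X' (pvReplC 'x' 'z' (pvReplC 'X' 'Z' ch))))) = swapCB ch := by
  by_cases h1 : ch = 'X'; · subst h1; decide
  by_cases h2 : ch = 'x'; · subst h2; decide
  by_cases h3 : ch = 'O'; · subst h3; decide
  by_cases h4 : ch = 'o'; · subst h4; decide
  by_cases h5 : ch = 'Z'; · subst h5; decide
  by_cases h6 : ch = 'z'; · subst h6; decide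
  simp [pvReplC, swapCB, h1, h2, h3, h4, h5, h6]

theorem swap_eq (p : List (List Char)) : swapA p = swapB p := by
  unfold swapA swapB pvReplace
  refine List.map_congr_left (fun l _ => ?_)
  simp only [List.map_map]
  refine List.map_congr_left (fun ch _ => ?_)
  simp only [Function.comp_apply]
  exact swapc_eq ch

theorem rot90_eq : rot90A = rot90B := rfl
theorem vertflip_eq : vertflipA = vertflipB := rfl
theorem horizflip_eq : horizflipA = horizflipB := rfl

-- ===== VERDICT (by name: the statement is the Claim_ definition above) =====
theorem pat3_expand_spec : Claim_equal_pat3_expand := by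
  intro pat _ _
  show pat3_expand pat = pat3_expand_alt pat
  simp only [pat3_expand, pat3_expand_alt, List.foldl_cons, List.foldl_nil,
    List.flatMap_cons, List.flatMap_nil, List.flatMap_append, List.append_nil, wildcards_eq, swap_eq,
    rot90_eq, vertflip_eq, horizflip_eq, List.append_assoc]
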